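-- pv_equiv track=rewrite | github.com/benbendaisy/CommunicationCodes | python_module/examples/956_Tallest_Billboard.py | tallestBillboard1
-- ===== SOURCE A (Python) =====
-- from typing import List
--
-- def tallestBillboard1(rods: List[int]) -> int:
--     sums = sum(rods)
--     dp = [-1] * (sums + 1)
--     dp[0] = 0
--     for rod in rods:
--         deep_copy = dp[:]
--         for i in range(sums - rod + 1):
--             if deep_copy[i] < 0:
--                 continue
--             dp[i + rod] = max(dp[i + rod], deep_copy[i])
--             dp[abs(i - rod)] = max(dp[abs(i - rod)], deep_copy[i] + min(i, rod))
--     return dp[0]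
-- ===== SOURCE B (Python) =====
-- from typing import List
--
-- def tallestBillboard1(rods: List[int]) -> int:
--     # Phase 1 (forward): the set of reachable support-height differences after each prefix.
--     reach = [{0}]
--     for r in rods:
--         prev = reach[-1]
--         cur = set(prev)
--         for d in prev:
--             cur.add(d + r)
--             cur.add(abs(d - r))
--         reach.append(cur)
--     reach.pop()
--     # Phase 2 (backward): best[d] = the largest shorter-side sum the remaining suffix can
--     # still add when the current difference is d (None = the suffix cannot rebalance d).
--     best = {0: 0}
--     for r, prev in zip(reversed(rods), reversed(reach)):
--         cur = {}
--         for d in prev: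
--             c = best.get(d)
--             t = best.get(d + r)
--             if t is not None and (c is None or t > c):
--                 c = t
--             s = best.get(abs(d - r))
--             if s is not None:
--                 s = s + min(d, r)
--                 if c is None or s > c:
--                     c = s
--             cur[d] = c
--         best = cur
--     return best[0]
-- ===== Notes on version B (the rewrite author's own statement) =====
-- stated objective: alternative
-- what changed: Replaces A's single forward pass accumulating shorter-side heights in a full (sum+1)-slot array by a two-phase algorithm: a forward pass that only collects the set of reachable differences per prefix, then a backward pass computing for each reachable difference the best shorter-side sum the remaining suffix can still add, combined at difference 0.
import Mathlib
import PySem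

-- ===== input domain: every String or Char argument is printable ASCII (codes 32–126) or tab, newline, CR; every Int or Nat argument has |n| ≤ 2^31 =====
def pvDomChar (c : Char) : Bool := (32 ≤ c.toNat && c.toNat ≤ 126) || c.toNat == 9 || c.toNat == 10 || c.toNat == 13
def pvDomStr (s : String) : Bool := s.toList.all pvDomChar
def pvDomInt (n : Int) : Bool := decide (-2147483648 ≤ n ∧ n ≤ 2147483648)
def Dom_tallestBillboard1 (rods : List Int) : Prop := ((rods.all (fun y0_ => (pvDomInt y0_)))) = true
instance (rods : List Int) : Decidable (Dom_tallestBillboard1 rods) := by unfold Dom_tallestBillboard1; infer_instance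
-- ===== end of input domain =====

-- B replaces A's one forward accumulation pass over a full 0..sum array by two staged passes:
-- a forward pass collecting only the sets of reachable differences per prefix, then a backward
-- pass computing, per reachable difference, the best shorter-side sum the suffix can still add
-- (objective: alternative two-phase algorithm over reachable states).

-- ===== PORT A =====
-- one rod of A's outer loop: scan i over range(sums - rod + 1), skip negative snapshot entries, relax the two targets
def pvStepA (sums rod : Int) (dp : List Int) : List Int :=
  (PySem.List.pyRange 0 (sums - rod + 1) 1).foldl (fun cur i =>
    if PySem.List.pyGetD dp i (-1) < 0 then cur
    else
      let c1 := PySem.List.pySetD cur (i + rod)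
        (max (PySem.List.pyGetD cur (i + rod) (-1)) (PySem.List.pyGetD dp i (-1)))
      PySem.List.pySetD c1 (|i - rod|)
        (max (PySem.List.pyGetD c1 (|i - rod|) (-1)) (PySem.List.pyGetD dp i (-1) + min i rod))) dp

def tallestBillboard1 (rods : List Int) : Int :=
  let sums := rods.sum
  let dp0 : List Int := List.replicate (sums + 1).toNat (-1)
  let dp1 := PySem.List.pySetD dp0 0 0
  PySem.List.pyGetD (rods.foldl (fun dp rod => pvStepA sums rod dp) dp1) 0 (-1)

-- ===== PORT B =====
-- phase 1 inner loop: cur = set(prev); for d in prev: cur.add(d + r); cur.add(abs(d - r))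
def pvPhase1Step (r : Int) (prev : PySem.Set Int) : PySem.Set Int :=
  prev.foldl (fun c d => PySem.Set.add (PySem.Set.add c (d + r)) (|d - r|))
    (PySem.Set.ofList prev)

-- phase 1: reach = [{0}]; for r in rods: reach.append(step); reach.pop()  (state = (reach-after-pop, last))
def pvPhase1 (rods : List Int) : List (PySem.Set Int) × PySem.Set Int :=
  rods.foldl (fun st r => (st.1 ++ [st.2], pvPhase1Step r st.2)) ([], PySem.Set.ofList [0])

-- body of phase 2's inner loop: the candidate chain computing c for one difference d
-- (best.get(x) is best.getD x none: Python's .get conflates a missing key with a stored None, as here)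
def pvCombine (best : PySem.Dict Int (Option Int)) (r d : Int) : Option Int :=
  let c := best.getD d none
  let t := best.getD (d + r) none
  let c2 := match t, c with
    | some tv, none => some tv
    | some tv, some cv => if cv < tv then some tv else some cv
    | none, _ => c
  match best.getD (|d - r|) none with
  | some sv =>
      let sv2 := sv + min d r
      match c2 with
      | none => some sv2
      | some cv => if cv < sv2 then some sv2 else some cv
  | none => c2

-- one level of phase 2: cur = {}; for d in prev: cur[d] = c; best = cur
def pvPhase2Step (best : PySem.Dict Int (Option Int)) (rp : Int × PySem.Set Int) :
    PySem.Dict Int (Option Int) :=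
  rp.2.foldl (fun cur d => cur.insert d (pvCombine best rp.1 d)) PySem.Dict.empty

def tallestBillboard1_alt (rods : List Int) : Int :=
  let reach := (pvPhase1 rods).1
  let best := (rods.reverse.zip reach.reverse).foldl pvPhase2Step
    ((PySem.Dict.empty).insert 0 (some 0))
  -- return best[0]: key 0 is always present and holds an int (the skip-everything assignment),
  -- so the none branch is unreachable
  match best.getD 0 none with
  | some v => v
  | none => 0

-- ===== PRECONDITION & SPEC =====
-- Pre_ excludes lists containing a negative rod: there A always raises an IndexError
-- (its scan range exceeds the array length, or a target index falls below -len).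
def Pre_tallestBillboard1 (rods : List Int) : Prop := ∀ r ∈ rods, 0 ≤ r
instance (rods : List Int) : Decidable (Pre_tallestBillboard1 rods) := by
  unfold Pre_tallestBillboard1; infer_instance
def pvWitness_tallestBillboard1 : List Int := [1, 2, 3, 6]

def Spec_tallestBillboard1 (rods : List Int) (out : Int) : Prop := out = tallestBillboard1_alt rods
instance (rods : List Int) (out : Int) : Decidable (Spec_tallestBillboard1 rods out) := by
  unfold Spec_tallestBillboard1; infer_instance

-- ===== CLAIM (what is proved, stated in full; the proofs are below) =====
def Claim_equal_tallestBillboard1 : Prop := ∀ (rods : List Int), Dom_tallestBillboard1 rods → Pre_tallestBillboard1 rods → Spec_tallestBillboard1 rods (tallestBillboard1 rods)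

-- ===== LEMMAS AND PROOFS =====

-- ---- A ↔ dict-DP bridge: a proof-only dict re-statement of A's relaxation ----
-- relax one snapshot pair p = (difference, shorter-side sum) into the dict
def pvUpdD (rod : Int) (d2 : PySem.Dict Int Int) (p : Int × Int) : PySem.Dict Int Int :=
  let d3 := d2.insert (p.1 + rod) (max (d2.getD (p.1 + rod) (-1)) p.2)
  d3.insert (|p.1 - rod|) (max (d3.getD (|p.1 - rod|) (-1)) (p.2 + min p.1 rod))

-- one rod, relaxing every snapshot entry
def pvStepD (rod : Int) (dp : PySem.Dict Int Int) : PySem.Dict Int Int :=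
  dp.items.foldl (pvUpdD rod) dp

-- per-target effect of relaxing with one snapshot pair p: conditional max-updates at the two targets
def pvApply (rod t : Int) (v : Int) (p : Int × Int) : Int :=
  let v1 := if p.1 + rod = t then max v p.2 else v
  if |p.1 - rod| = t then max v1 (p.2 + min p.1 rod) else v1

-- A's inner-loop body, recast on a snapshot pair (index, snapshot value)
def pvUpdA (rod : Int) (cur : List Int) (p : Int × Int) : List Int :=
  let c1 := PySem.List.pySetD cur (p.1 + rod) (max (PySem.List.pyGetD cur (p.1 + rod) (-1)) p.2)
  PySem.List.pySetD c1 (|p.1 - rod|) (max (PySem.List.pyGetD c1 (|p.1 - rod|) (-1)) (p.2 + min p.1 rod))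

-- A's reachable-source pairs for one rod: indices of the scanned range whose snapshot entry is ≥ 0
def pvSrc (sums rod : Int) (dp : List Int) : List (Int × Int) :=
  ((PySem.List.pyRange 0 (sums - rod + 1) 1).filter
      (fun i => !decide (PySem.List.pyGetD dp i (-1) < 0))).map
    (fun i => (i, PySem.List.pyGetD dp i (-1)))

theorem pvFoldl_guard {α β γ : Type} (xs : List β) (s : α) (c : β → Bool) (f : β → γ)
    (g : α → γ → α) :
    xs.foldl (fun a x => if c x then a else g a (f x)) s
      = ((xs.filter (fun x => !c x)).map f).foldl g s := by
  induction xs generalizing s with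
  | nil => rfl
  | cons x xs ih => by_cases h : c x <;> simp [h, ih]

theorem pvStepA_eq (sums rod : Int) (dp : List Int) :
    pvStepA sums rod dp = (pvSrc sums rod dp).foldl (pvUpdA rod) dp := by
  unfold pvStepA pvSrc
  rw [← pvFoldl_guard (PySem.List.pyRange 0 (sums - rod + 1) 1) dp
      (fun i => decide (PySem.List.pyGetD dp i (-1) < 0))
      (fun i => (i, PySem.List.pyGetD dp i (-1))) (pvUpdA rod)]
  simp [pvUpdA]

theorem pvGetD_setD (xs : List Int) (j t v : Int) (hj0 : 0 ≤ j) (hj : j < (xs.length : Int))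
    (ht : 0 ≤ t) :
    PySem.List.pyGetD (PySem.List.pySetD xs j v) t (-1)
      = if t = j then v else PySem.List.pyGetD xs t (-1) := by
  rw [PySem.List.pySetD_of_nonneg xs v hj0]
  have hgd : ∀ (ys : List Int), PySem.List.pyGetD ys t (-1) = ys.getD t.toNat (-1) := by
    intro ys
    simp [PySem.List.pyGetD, PySem.List.pyGet?_of_nonneg ys ht, List.getD_eq_getElem?_getD]
  rw [hgd, hgd, List.getD_eq_getElem?_getD, List.getD_eq_getElem?_getD]
  by_cases h : t = j
  · subst h; rw [List.getElem?_set_self (by omega)]; simp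
  · rw [List.getElem?_set_ne (by omega)]; simp [h]

theorem pvUpdA_getD (rod t : Int) (l : List Int) (p : Int × Int)
    (hp1 : 0 ≤ p.1) (hrod : 0 ≤ rod) (hb : p.1 + rod < (l.length : Int)) (ht : 0 ≤ t) :
    PySem.List.pyGetD (pvUpdA rod l p) t (-1)
      = pvApply rod t (PySem.List.pyGetD l t (-1)) p := by
  have habs : |p.1 - rod| ≤ p.1 + rod := abs_sub_le_iff.mpr ⟨by omega, by omega⟩
  have habs0 : 0 ≤ |p.1 - rod| := abs_nonneg _
  have hlen : ((PySem.List.pySetD l (p.1 + rod) (max (PySem.List.pyGetD l (p.1 + rod) (-1)) p.2)).length : Int) = (l.length : Int) := by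
    rw [PySem.List.length_pySetD]
  simp only [pvUpdA, pvApply]
  rw [pvGetD_setD _ _ _ _ habs0 (by omega) ht,
      pvGetD_setD _ _ _ _ (by omega) (by omega) ht,
      pvGetD_setD _ _ _ _ (by omega) (by omega) habs0]
  generalize |p.1 - rod| = A at *
  generalize hY : p.1 + rod = Y at *
  split_ifs <;> subst_vars <;> first | rfl | omega

theorem pvLength_updA (rod : Int) (cur : List Int) (p : Int × Int) :
    (pvUpdA rod cur p).length = cur.length := by
  simp [pvUpdA, PySem.List.length_pySetD]

theorem pvFoldA_getD (rod t : Int) (ps : List (Int × Int)) (l : List Int)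
    (hps : ∀ p ∈ ps, 0 ≤ p.1 ∧ p.1 + rod < (l.length : Int))
    (hrod : 0 ≤ rod) (ht : 0 ≤ t) :
    PySem.List.pyGetD (ps.foldl (pvUpdA rod) l) t (-1)
      = ps.foldl (pvApply rod t) (PySem.List.pyGetD l t (-1)) := by
  induction ps generalizing l with
  | nil => rfl
  | cons p ps ih =>
      obtain ⟨h1, h2⟩ := hps p (by simp)
      simp only [List.foldl_cons]
      rw [ih (pvUpdA rod l p) ?_, pvUpdA_getD rod t l p h1 hrod h2 ht]
      intro q hq
      have := hps q (by simp [hq])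
      rw [pvLength_updA]
      exact this

theorem pvUpdD_getD (rod t : Int) (d : PySem.Dict Int Int) (p : Int × Int) :
    (pvUpdD rod d p).getD t (-1) = pvApply rod t (d.getD t (-1)) p := by
  simp only [pvUpdD, pvApply, PySem.Dict.getD_insert]
  generalize |p.1 - rod| = A at *
  split_ifs <;> subst_vars <;> first | rfl | omega

theorem pvFoldD_getD (rod t : Int) (ps : List (Int × Int)) (d : PySem.Dict Int Int) :
    (ps.foldl (pvUpdD rod) d).getD t (-1) = ps.foldl (pvApply rod t) (d.getD t (-1)) := by
  induction ps generalizing d with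
  | nil => rfl
  | cons p ps ih => simp only [List.foldl_cons, ih, pvUpdD_getD]

theorem pvNodupKeys_foldD (rod : Int) (ps : List (Int × Int)) (d : PySem.Dict Int Int)
    (hd : d.keys.Nodup) : (ps.foldl (pvUpdD rod) d).keys.Nodup := by
  induction ps generalizing d with
  | nil => exact hd
  | cons p ps ih =>
      exact ih _ (PySem.Dict.nodup_keys_insert _ _ _ (PySem.Dict.nodup_keys_insert _ _ _ hd))

theorem pvItems_bound_foldD (rod B : Int) (ps : List (Int × Int)) (d : PySem.Dict Int Int)
    (hrod : 0 ≤ rod)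
    (hps : ∀ p ∈ ps, 0 ≤ p.1 ∧ p.1 + rod ≤ B ∧ 0 ≤ p.2)
    (hdi : ∀ p ∈ d.items, 0 ≤ p.1 ∧ p.1 ≤ B ∧ 0 ≤ p.2) :
    ∀ p ∈ (ps.foldl (pvUpdD rod) d).items, 0 ≤ p.1 ∧ p.1 ≤ B ∧ 0 ≤ p.2 := by
  induction ps generalizing d with
  | nil => exact hdi
  | cons p ps ih =>
      obtain ⟨hp0, hpB, hp2⟩ := hps p (by simp)
      refine ih _ (fun q hq => hps q (by simp [hq])) ?_
      intro q hq
      simp only [pvUpdD] at hq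
      rcases (PySem.Dict.mem_items_insert _ _ _ _).mp hq with h | ⟨h, _⟩
      · subst h
        refine ⟨abs_nonneg _, abs_sub_le_iff.mpr ⟨by omega, by omega⟩, ?_⟩
        have h0 : (0 : Int) ≤ min p.1 rod := le_min hp0 hrod
        exact le_max_of_le_right (by omega)
      · rcases (PySem.Dict.mem_items_insert _ _ _ _).mp h with h2 | ⟨h2, _⟩
        · subst h2
          exact ⟨by omega, by omega, le_max_of_le_right hp2⟩
        · exact hdi q h2

-- the loop invariant tying A's array to the dict after processing a prefix summing to b
def pvInv (sums b : Int) (l : List Int) (d : PySem.Dict Int Int) : Prop :=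
  (l.length : Int) = sums + 1 ∧ d.keys.Nodup ∧
  (∀ p ∈ d.items, 0 ≤ p.1 ∧ p.1 ≤ b ∧ 0 ≤ p.2) ∧
  (∀ t : Int, 0 ≤ t → t ≤ sums → PySem.List.pyGetD l t (-1) = d.getD t (-1))

theorem pvMem_src (sums rod : Int) (l : List Int) (p : Int × Int) :
    p ∈ pvSrc sums rod l ↔
      0 ≤ p.1 ∧ p.1 < sums - rod + 1 ∧ ¬ PySem.List.pyGetD l p.1 (-1) < 0 ∧
        p.2 = PySem.List.pyGetD l p.1 (-1) := by
  simp only [pvSrc, List.mem_map, List.mem_filter, PySem.List.mem_pyRange_one]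
  constructor
  · rintro ⟨i, ⟨⟨hi0, hi1⟩, hge⟩, rfl⟩
    simp_all
  · rintro ⟨h0, h1, h2, h3⟩
    exact ⟨p.1, ⟨⟨h0, h1⟩, by simp [h2]⟩, by rw [← h3]⟩

theorem pvNodup_src (sums rod : Int) (l : List Int) : (pvSrc sums rod l).Nodup := by
  apply List.Nodup.map
  · intro a b h
    exact congrArg Prod.fst h
  · exact (PySem.List.nodup_pyRange_one _ _).filter _

theorem pvSrc_perm_items (sums b rod : Int) (l : List Int) (d : PySem.Dict Int Int)
    (hrod : 0 ≤ rod) (hbr : b + rod ≤ sums) (hinv : pvInv sums b l d) :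
    (pvSrc sums rod l).Perm d.items := by
  obtain ⟨hlen, hnd, hbound, hmatch⟩ := hinv
  apply (List.perm_ext_iff_of_nodup (pvNodup_src sums rod l) (List.Nodup.of_map _ hnd)).mpr
  intro p
  rw [pvMem_src]
  constructor
  · rintro ⟨h0, h1, h2, h3⟩
    have hts : p.1 ≤ sums := by omega
    have : d.getD p.1 (-1) = p.2 := by rw [← hmatch p.1 h0 hts, h3]
    have hcontains : d.get? p.1 = some p.2 := by
      rcases hc : d.get? p.1 with _ | w
      · rw [PySem.Dict.getD_eq_get?_getD, hc] at this
        simp at this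
        omega
      · rw [PySem.Dict.getD_eq_get?_getD, hc] at this
        simpa [← this] using hc
    have := (PySem.Dict.get?_eq_some_iff_mem_items d p.1 p.2 hnd).mp hcontains
    simpa using this
  · intro hp
    obtain ⟨h0, hb, hv⟩ := hbound p hp
    have hget : d.get? p.1 = some p.2 := by
      apply (PySem.Dict.get?_eq_some_iff_mem_items d p.1 p.2 hnd).mpr
      simpa using hp
    have hgd : d.getD p.1 (-1) = p.2 := by rw [PySem.Dict.getD_eq_get?_getD, hget]; rfl
    have hm : PySem.List.pyGetD l p.1 (-1) = p.2 := by
      rw [hmatch p.1 h0 (by omega), hgd]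
    exact ⟨h0, by omega, by omega, hm.symm⟩

theorem pvApply_comm (rod t : Int) : ∀ (p q : Int × Int) (v : Int),
    pvApply rod t (pvApply rod t v p) q = pvApply rod t (pvApply rod t v q) p := by
  intro p q v
  simp only [pvApply]
  generalize |p.1 - rod| = A at *
  generalize |q.1 - rod| = B at *
  split_ifs <;> simp [max_assoc, max_comm, max_left_comm]

theorem pvLength_foldA (rod : Int) (ps : List (Int × Int)) (l : List Int) :
    (ps.foldl (pvUpdA rod) l).length = l.length := by
  induction ps generalizing l with
  | nil => rfl
  | cons p ps ih => rw [List.foldl_cons, ih, pvLength_updA]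

theorem pvStep_inv (sums b rod : Int) (l : List Int) (d : PySem.Dict Int Int)
    (hrod : 0 ≤ rod) (hb : 0 ≤ b) (hbr : b + rod ≤ sums) (hinv : pvInv sums b l d) :
    pvInv sums (b + rod) (pvStepA sums rod l) (pvStepD rod d) := by
  have hperm := pvSrc_perm_items sums b rod l d hrod hbr hinv
  obtain ⟨hlen, hnd, hbound, hmatch⟩ := hinv
  refine ⟨?_, ?_, ?_, ?_⟩
  · rw [pvStepA_eq, pvLength_foldA]; exact hlen
  · exact pvNodupKeys_foldD rod d.items d hnd
  · exact pvItems_bound_foldD rod (b + rod) d.items d hrod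
      (fun p hp => ⟨(hbound p hp).1, by have := (hbound p hp).2.1; omega, (hbound p hp).2.2⟩)
      (fun p hp => ⟨(hbound p hp).1, by have := (hbound p hp).2.1; omega, (hbound p hp).2.2⟩)
  · intro t ht0 hts
    rw [pvStepA_eq, pvFoldA_getD rod t _ l ?_ hrod ht0]
    · rw [show pvStepD rod d = d.items.foldl (pvUpdD rod) d from rfl, pvFoldD_getD,
         ← hmatch t ht0 hts]
      exact List.Perm.foldl_eq' hperm (fun x _ y _ v => pvApply_comm rod t x y v) _
    · intro p hp
      rw [pvMem_src] at hp
      refine ⟨hp.1, by omega⟩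

theorem pvLoop_inv (sums : Int) (rest : List Int) : ∀ (b : Int) (l : List Int)
    (d : PySem.Dict Int Int), (∀ r ∈ rest, 0 ≤ r) → 0 ≤ b → b + rest.sum ≤ sums →
    pvInv sums b l d →
    pvInv sums (b + rest.sum) (rest.foldl (fun dp rod => pvStepA sums rod dp) l)
      (rest.foldl (fun dp rod => pvStepD rod dp) d) := by
  induction rest with
  | nil => intro b l d _ _ _ h; simpa using h
  | cons rod rest ih =>
      intro b l d hpos hb hsum hinv
      have hrod : 0 ≤ rod := hpos rod (by simp)
      have hrest : 0 ≤ rest.sum := List.sum_nonneg (fun r hr => hpos r (by simp [hr]))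
      have := ih (b + rod) (pvStepA sums rod l) (pvStepD rod d)
        (fun r hr => hpos r (by simp [hr])) (by omega)
        (by rw [List.sum_cons] at hsum; omega)
        (pvStep_inv sums b rod l d hrod hb (by rw [List.sum_cons] at hsum; omega) hinv)
      simpa [add_assoc] using this

theorem pvInit_inv (sums : Int) (hs : 0 ≤ sums) :
    pvInv sums 0 (PySem.List.pySetD (List.replicate (sums + 1).toNat (-1)) 0 0)
      ((PySem.Dict.empty : PySem.Dict Int Int).insert 0 0) := by
  have hlen : ((PySem.List.pySetD (List.replicate (sums + 1).toNat (-1 : Int)) 0 0).length : Int) = sums + 1 := by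
    rw [PySem.List.length_pySetD, List.length_replicate]; omega
  refine ⟨hlen, ?_, ?_, ?_⟩
  · simp [PySem.Dict.keys_insert_of_not_contains, PySem.Dict.keys_empty]
  · intro p hp
    have : p ∈ (PySem.Dict.empty : PySem.Dict Int Int).items ∨ p = (0, 0) := by
      simpa [PySem.Dict.items_insert_of_not_contains] using hp
    rcases this with h | h
    · simp [PySem.Dict.empty] at h
    · simp [h]
  · intro t ht0 hts
    rw [pvGetD_setD _ _ _ _ le_rfl (by rw [List.length_replicate]; omega) ht0]
    by_cases h : t = 0
    · simp [h]
    · rw [if_neg h, PySem.Dict.getD_insert, if_neg h, PySem.Dict.getD_empty]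
      have : PySem.List.pyGetD (List.replicate (sums + 1).toNat (-1 : Int)) t (-1) = -1 := by
        rw [PySem.List.pyGetD_eq_getElem _ _ ht0 (by simp; omega)]
        exact List.getElem_replicate _
      rw [this]

-- The common specification: pvG s d = the largest extra shorter-side sum the rod list s can
-- still contribute when the current support difference is d (none = s cannot rebalance d).
def pvOmax (a b : Option Int) : Option Int :=
  match a, b with
  | some x, some y => some (max x y)
  | some x, none => some x
  | none, b => b

def pvG : List Int → Int → Option Int
  | [], d => if d = 0 then some 0 else none
  | r :: rs, d =>
      pvOmax (pvOmax (pvG rs d) (pvG rs (d + r))) ((pvG rs (|d - r|)).map (· + min d r))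

theorem pvG_nil (d : Int) : pvG [] d = if d = 0 then some 0 else none := rfl
theorem pvG_cons (r : Int) (rs : List Int) (d : Int) :
    pvG (r :: rs) d
      = pvOmax (pvOmax (pvG rs d) (pvG rs (d + r))) ((pvG rs (|d - r|)).map (· + min d r)) := rfl

theorem pvOmax_nonneg {a b : Option Int} (ha : ∀ x, a = some x → 0 ≤ x)
    (hb : ∀ x, b = some x → 0 ≤ x) : ∀ m, pvOmax a b = some m → 0 ≤ m := by
  intro m h
  cases a with
  | none => exact hb m (by simpa [pvOmax] using h)
  | some x =>
      cases b with
      | none =>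
          simp [pvOmax] at h
          exact h ▸ ha x rfl
      | some y =>
          simp [pvOmax] at h
          have := ha x rfl
          omega

theorem pvG_nonneg (s : List Int) (hs : ∀ x ∈ s, 0 ≤ x) :
    ∀ (k : Int), 0 ≤ k → ∀ g, pvG s k = some g → 0 ≤ g := by
  induction s with
  | nil =>
      intro k hk g h
      rw [pvG_nil] at h
      split_ifs at h <;> simp at h
      omega
  | cons r rs ih =>
      intro k hk g h
      have hr : 0 ≤ r := hs r (by simp)
      have ih' := ih (fun x hx => hs x (by simp [hx]))
      rw [pvG_cons] at h
      refine pvOmax_nonneg (pvOmax_nonneg (ih' k hk) (ih' (k + r) (by omega))) ?_ g h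
      intro x hx
      rcases hg : pvG rs (|k - r|) with _ | g'
      · simp [hg] at hx
      · have := ih' (|k - r|) (abs_nonneg _) g' hg
        simp [hg] at hx
        have hm : (0 : Int) ≤ min k r := le_min hk hr
        omega

theorem pvG_zero_isSome (s : List Int) : ∃ g, pvG s 0 = some g := by
  induction s with
  | nil => exact ⟨0, by simp [pvG_nil]⟩
  | cons r rs ih =>
      obtain ⟨g, hg⟩ := ih
      rw [pvG_cons, hg]
      rcases h2 : pvG rs (0 + r) with _ | y <;>
        rcases h3 : (pvG rs (|0 - r|)).map (· + min 0 r) with _ | z <;>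
          simp [pvOmax]

-- ---- dict-DP ↔ pvG: the exchange argument ----
-- the contribution of one dict entry (difference, value v) against a suffix potential
def pvCo (v : Int) (o : Option Int) : Int :=
  match o with
  | some g => v + g
  | none => -1

-- the best final height obtainable from dict d followed by suffix s
def pvCD (s : List Int) (d : PySem.Dict Int Int) : Int :=
  (d.items.map (fun p => pvCo p.2 (pvG s p.1))).foldl max (-1)

theorem pvFM_le (l : List Int) (a : Int) : a ≤ l.foldl max a := by
  induction l generalizing a with
  | nil => simp
  | cons x l ih => exact le_trans (le_max_left a x) (ih _)

theorem pvFM_shift (l : List Int) (a b : Int) :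
    l.foldl max (max a b) = max a (l.foldl max b) := by
  induction l generalizing b with
  | nil => rfl
  | cons x l ih =>
      simp only [List.foldl_cons]
      rw [max_assoc, ih]

theorem pvFM_split {β : Type} (l : List β) (f g : β → Int) : ∀ (a b : Int),
    (l.map (fun x => max (f x) (g x))).foldl max (max a b)
      = max ((l.map f).foldl max a) ((l.map g).foldl max b) := by
  induction l with
  | nil => intro a b; rfl
  | cons x l ih =>
      intro a b
      simp only [List.map_cons, List.foldl_cons]
      rw [show max (max a b) (max (f x) (g x)) = max (max a (f x)) (max b (g x)) by
        rcases max_cases a b <;> rcases max_cases (f x) (g x) <;> omega]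
      exact ih _ _

theorem pvFM_all_bot (l : List Int) (a : Int) (ha : -1 ≤ a) (h : ∀ x ∈ l, x = -1) :
    l.foldl max a = a := by
  induction l generalizing a with
  | nil => rfl
  | cons x l ih =>
      rw [List.foldl_cons, h x (by simp), max_eq_left ha]
      exact ih a ha (fun x hx => h x (by simp [hx]))

theorem pvCD_ge (s : List Int) (d : PySem.Dict Int Int) : -1 ≤ pvCD s d := pvFM_le _ _

-- pvCD is invariant under permutation of the item list
theorem pvFM_perm (l l' : List Int) (h : l.Perm l') (a : Int) :
    l.foldl max a = l'.foldl max a :=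
  List.Perm.foldl_eq' h (fun x _ y _ v => by rw [max_assoc, max_comm x y, ← max_assoc]) a

-- entries of l other than the one with key k are untouched by the replacement map
theorem pvMap_replace_id (l : List (Int × Int)) (k v : Int)
    (h : ∀ p ∈ l, p.1 ≠ k) :
    l.map (fun p => if p.1 == k then (k, v) else p) = l := by
  induction l with
  | nil => rfl
  | cons q l ih =>
      simp only [List.map_cons]
      rw [if_neg (by simp [h q (by simp)]), ih (fun p hp => h p (by simp [hp]))]

-- inserting key k with value max (d.getD k (-1)) w bumps the best height by pvCo w (pvG s k)
theorem pvCD_insert (s : List Int) (d : PySem.Dict Int Int) (k w : Int)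
    (hnd : d.keys.Nodup) (hw : 0 ≤ w) :
    pvCD s (d.insert k (max (d.getD k (-1)) w)) = max (pvCD s d) (pvCo w (pvG s k)) := by
  by_cases hc : d.contains k = true
  · -- key present: one entry's value is replaced by max v0 w
    obtain ⟨v0, hv0⟩ : ∃ v0, d.get? k = some v0 := by
      rw [PySem.Dict.contains_eq_isSome_get?] at hc
      cases hk : d.get? k with
      | none => rw [hk] at hc; simp at hc
      | some v0 => exact ⟨v0, rfl⟩
    have hmem : (k, v0) ∈ d.items := PySem.Dict.mem_items_of_get?_eq_some d hv0
    have hgd : d.getD k (-1) = v0 := PySem.Dict.getD_of_mem_items d hmem hnd (-1)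
    have hperm : d.items.Perm ((k, v0) :: d.items.erase (k, v0)) :=
      List.perm_cons_erase hmem
    have hndk : (k :: (d.items.erase (k, v0)).map Prod.fst).Nodup := by
      have := (hperm.map Prod.fst).nodup_iff.mp hnd
      simpa using this
    have hrest : ∀ p ∈ d.items.erase (k, v0), p.1 ≠ k := by
      intro p hp hpk
      exact (List.nodup_cons.mp hndk).1 (List.mem_map.mpr ⟨p, hp, hpk⟩)
    have hmap : (d.items.map (fun p => if p.1 == k then (k, max v0 w) else p)).Perm
        ((k, max v0 w) :: d.items.erase (k, v0)) := by
      have h2 := hperm.map (fun p => if p.1 == k then (k, max v0 w) else p)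
      rw [List.map_cons, pvMap_replace_id _ _ _ hrest, if_pos (by simp)] at h2
      exact h2
    rw [hgd, pvCD, pvCD, PySem.Dict.items_insert_of_contains _ _ hc,
      pvFM_perm _ _ (hmap.map _) _, pvFM_perm _ _ (hperm.map _) _]
    simp only [List.map_cons, List.foldl_cons]
    rw [max_comm (-1) (pvCo (max v0 w) (pvG s k)), max_comm (-1) (pvCo v0 (pvG s k)),
      pvFM_shift, pvFM_shift]
    have hX := pvFM_le ((d.items.erase (k, v0)).map (fun p => pvCo p.2 (pvG s p.1))) (-1)
    cases hgk : pvG s k with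
    | none => simp only [pvCo]; omega
    | some g => simp only [pvCo]; omega
  · -- key absent: the new entry is appended, and getD k (-1) = -1
    have hc' : d.contains k = false := by simpa using hc
    rw [PySem.Dict.getD_of_not_contains _ _ hc', pvCD, pvCD,
      PySem.Dict.items_insert_of_not_contains _ _ hc', List.map_append, List.foldl_append]
    simp only [List.map_cons, List.map_nil, List.foldl_cons, List.foldl_nil]
    rw [show max (-1 : Int) w = w by omega]

-- invariant for dicts entering the exchange: unique keys, nonnegative keys and values
def pvDInv (d : PySem.Dict Int Int) : Prop :=
  d.keys.Nodup ∧ ∀ p ∈ d.items, 0 ≤ p.1 ∧ 0 ≤ p.2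

-- what one relaxation of entry p with rod r adds to the best height
def pvContrib2 (s : List Int) (r : Int) (p : Int × Int) : Int :=
  max (pvCo p.2 (pvG s (p.1 + r))) (pvCo (p.2 + min p.1 r) (pvG s (|p.1 - r|)))

theorem pvCD_updD (s : List Int) (r : Int) (d : PySem.Dict Int Int) (p : Int × Int)
    (hnd : d.keys.Nodup) (h1 : 0 ≤ p.1) (h2 : 0 ≤ p.2) (hr : 0 ≤ r) :
    pvCD s (pvUpdD r d p) = max (pvCD s d) (pvContrib2 s r p) := by
  unfold pvUpdD
  rw [pvCD_insert _ _ _ _ (PySem.Dict.nodup_keys_insert _ _ _ hnd)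
      (by have := le_min h1 hr; omega),
    pvCD_insert _ _ _ _ hnd h2, pvContrib2, max_assoc]

theorem pvUpdD_dinv (r : Int) (d : PySem.Dict Int Int) (p : Int × Int)
    (hr : 0 ≤ r) (h1 : 0 ≤ p.1) (h2 : 0 ≤ p.2) (hinv : pvDInv d) :
    pvDInv (pvUpdD r d p) := by
  obtain ⟨hnd, hb⟩ := hinv
  refine ⟨PySem.Dict.nodup_keys_insert _ _ _ (PySem.Dict.nodup_keys_insert _ _ _ hnd), ?_⟩
  intro q hq
  simp only [pvUpdD] at hq
  rcases (PySem.Dict.mem_items_insert _ _ _ _).mp hq with h | ⟨h, _⟩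
  · subst h
    have := le_min h1 hr
    exact ⟨abs_nonneg _, le_max_of_le_right (by omega)⟩
  · rcases (PySem.Dict.mem_items_insert _ _ _ _).mp h with h3 | ⟨h3, _⟩
    · subst h3
      exact ⟨by omega, le_max_of_le_right h2⟩
    · exact hb q h3

theorem pvCD_foldUpd (s : List Int) (r : Int) (ps : List (Int × Int)) :
    ∀ (d : PySem.Dict Int Int), (∀ p ∈ ps, 0 ≤ p.1 ∧ 0 ≤ p.2) → pvDInv d → 0 ≤ r →
    pvCD s (ps.foldl (pvUpdD r) d)
      = max (pvCD s d) ((ps.map (pvContrib2 s r)).foldl max (-1)) := by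
  induction ps with
  | nil =>
      intro d _ _ _
      simpa using (max_eq_left (pvCD_ge s d)).symm
  | cons p ps ih =>
      intro d hps hinv hr
      obtain ⟨h1, h2⟩ := hps p (by simp)
      simp only [List.foldl_cons, List.map_cons]
      rw [ih (pvUpdD r d p) (fun q hq => hps q (by simp [hq]))
          (pvUpdD_dinv r d p hr h1 h2 hinv) hr,
        pvCD_updD s r d p hinv.1 h1 h2 hr,
        max_comm (-1) (pvContrib2 s r p), pvFM_shift]
      have := pvFM_le (ps.map (pvContrib2 s r)) (-1)
      omega

theorem pvCo_omax (v : Int) (a b : Option Int) (hv : 0 ≤ v)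
    (ha : ∀ g, a = some g → 0 ≤ g) (hb : ∀ g, b = some g → 0 ≤ g) :
    pvCo v (pvOmax a b) = max (pvCo v a) (pvCo v b) := by
  cases a with
  | none => cases b with
    | none => simp [pvCo, pvOmax]
    | some y => have := hb y rfl; simp [pvCo, pvOmax]; all_goals omega
  | some x =>
      have hx := ha x rfl
      cases b with
      | none => simp [pvCo, pvOmax]; all_goals omega
      | some y => have := hb y rfl; simp [pvCo, pvOmax]; all_goals omega

theorem pvCo_map (v c : Int) (o : Option Int) :
    pvCo v (o.map (· + c)) = pvCo (v + c) o := by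
  cases o <;> simp [pvCo] <;> ring

theorem pvCo_G_cons (s : List Int) (r : Int) (p : Int × Int)
    (hs : ∀ x ∈ s, 0 ≤ x) (hr : 0 ≤ r) (h1 : 0 ≤ p.1) (h2 : 0 ≤ p.2) :
    pvCo p.2 (pvG (r :: s) p.1)
      = max (pvCo p.2 (pvG s p.1)) (pvContrib2 s r p) := by
  have hA := pvG_nonneg s hs p.1 h1
  have hB := pvG_nonneg s hs (p.1 + r) (by omega)
  have hC := pvG_nonneg s hs (|p.1 - r|) (abs_nonneg _)
  have hmin : (0 : Int) ≤ min p.1 r := le_min h1 hr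
  rw [pvG_cons,
    pvCo_omax p.2 _ _ h2 (pvOmax_nonneg hA hB) ?hc,
    pvCo_omax p.2 _ _ h2 hA hB, pvCo_map, pvContrib2, max_assoc]
  case hc =>
    intro g hg
    rcases ho : pvG s (|p.1 - r|) with _ | g'
    · simp [ho] at hg
    · have := hC g' ho
      simp [ho] at hg
      omega

theorem pvCD_stepD (s : List Int) (r : Int) (d : PySem.Dict Int Int)
    (hs : ∀ x ∈ s, 0 ≤ x) (hr : 0 ≤ r) (hinv : pvDInv d) :
    pvCD s (pvStepD r d) = pvCD (r :: s) d := by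
  rw [show pvStepD r d = d.items.foldl (pvUpdD r) d from rfl,
    pvCD_foldUpd s r d.items d hinv.2 hinv hr]
  have hmap : d.items.map (fun p => pvCo p.2 (pvG (r :: s) p.1))
      = d.items.map (fun p => max (pvCo p.2 (pvG s p.1)) (pvContrib2 s r p)) := by
    apply List.map_congr_left
    intro p hp
    exact pvCo_G_cons s r p hs hr (hinv.2 p hp).1 (hinv.2 p hp).2
  have hsplit := pvFM_split d.items (fun p => pvCo p.2 (pvG s p.1)) (pvContrib2 s r) (-1) (-1)
  rw [show max (-1 : Int) (-1) = -1 by omega] at hsplit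
  rw [show pvCD (r :: s) d
      = (d.items.map (fun p => pvCo p.2 (pvG (r :: s) p.1))).foldl max (-1) from rfl, hmap,
    hsplit]
  rfl

theorem pvStepD_dinv (r : Int) (d : PySem.Dict Int Int) (hr : 0 ≤ r) (hinv : pvDInv d) :
    pvDInv (pvStepD r d) := by
  rw [show pvStepD r d = d.items.foldl (pvUpdD r) d from rfl]
  have : ∀ (ps : List (Int × Int)) (d' : PySem.Dict Int Int),
      (∀ p ∈ ps, 0 ≤ p.1 ∧ 0 ≤ p.2) → pvDInv d' → pvDInv (ps.foldl (pvUpdD r) d') := by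
    intro ps
    induction ps with
    | nil => intro d' _ h; exact h
    | cons p ps ih =>
        intro d' hps hinv'
        obtain ⟨h1, h2⟩ := hps p (by simp)
        exact ih _ (fun q hq => hps q (by simp [hq])) (pvUpdD_dinv r d' p hr h1 h2 hinv')
  exact this d.items d hinv.2 hinv

theorem pvCD_loop (s : List Int) : ∀ (d : PySem.Dict Int Int), (∀ x ∈ s, 0 ≤ x) → pvDInv d →
    pvCD [] (s.foldl (fun dp r => pvStepD r dp) d) = pvCD s d := by
  induction s with
  | nil => intro d _ _; rfl
  | cons r s ih =>
      intro d hs hinv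
      have hr : 0 ≤ r := hs r (by simp)
      have hs' : ∀ x ∈ s, 0 ≤ x := fun x hx => hs x (by simp [hx])
      rw [List.foldl_cons, ih (pvStepD r d) hs' (pvStepD_dinv r d hr hinv),
        pvCD_stepD s r d hs' hr hinv]

theorem pvCD_nil_eq_getD (d : PySem.Dict Int Int) (hnd : d.keys.Nodup)
    (hvals : ∀ p ∈ d.items, 0 ≤ p.2) :
    pvCD [] d = d.getD 0 (-1) := by
  by_cases hc : d.contains 0 = true
  · obtain ⟨v0, hv0⟩ : ∃ v0, d.get? 0 = some v0 := by
      rw [PySem.Dict.contains_eq_isSome_get?] at hc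
      cases hk : d.get? 0 with
      | none => rw [hk] at hc; simp at hc
      | some v0 => exact ⟨v0, rfl⟩
    have hmem : ((0 : Int), v0) ∈ d.items := PySem.Dict.mem_items_of_get?_eq_some d hv0
    have hgd : d.getD 0 (-1) = v0 := PySem.Dict.getD_of_mem_items d hmem hnd (-1)
    have hperm : d.items.Perm (((0 : Int), v0) :: d.items.erase (0, v0)) :=
      List.perm_cons_erase hmem
    have hndk : ((0 : Int) :: (d.items.erase (0, v0)).map Prod.fst).Nodup := by
      have := (hperm.map Prod.fst).nodup_iff.mp hnd
      simpa using this
    have hv00 : 0 ≤ v0 := hvals _ hmem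
    have hrest : ∀ x ∈ (d.items.erase (0, v0)).map (fun p => pvCo p.2 (pvG [] p.1)),
        x = -1 := by
      intro x hx
      obtain ⟨p, hp, hpx⟩ := List.mem_map.mp hx
      have hp1 : p.1 ≠ 0 := by
        intro h0
        exact (List.nodup_cons.mp hndk).1 (List.mem_map.mpr ⟨p, hp, h0⟩)
      rw [← hpx]
      simp [pvCo, pvG_nil, hp1]
    have hhead : pvCo v0 (pvG [] 0) = v0 := by simp [pvCo, pvG_nil]
    rw [pvCD, pvFM_perm _ _ (hperm.map _) _, hgd]
    simp only [List.map_cons, List.foldl_cons]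
    rw [hhead, pvFM_all_bot _ _ (by omega) hrest]
    omega
  · have hc' : d.contains 0 = false := by simpa using hc
    have hrest : ∀ x ∈ d.items.map (fun p => pvCo p.2 (pvG [] p.1)), x = -1 := by
      intro x hx
      obtain ⟨p, hp, hpx⟩ := List.mem_map.mp hx
      have hp1 : p.1 ≠ 0 := by
        intro h0
        rw [PySem.Dict.contains_eq_decide_mem_keys] at hc'
        simp at hc'
        exact hc' (h0 ▸ PySem.Dict.mem_keys_of_mem_items d hp)
      rw [← hpx]
      simp [pvCo, pvG_nil, hp1]
    rw [PySem.Dict.getD_of_not_contains _ _ hc', pvCD, pvFM_all_bot _ _ le_rfl hrest]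

-- A's result equals the backward-recursion potential at difference 0
theorem pvA_eq_G (rods : List Int) (hpre : ∀ r ∈ rods, 0 ≤ r) :
    tallestBillboard1 rods = pvCo 0 (pvG rods 0) := by
  have hs : 0 ≤ rods.sum := List.sum_nonneg hpre
  have hloop := pvLoop_inv rods.sum rods 0
    (PySem.List.pySetD (List.replicate (rods.sum + 1).toNat (-1)) 0 0)
    ((PySem.Dict.empty : PySem.Dict Int Int).insert 0 0)
    hpre le_rfl (by omega) (pvInit_inv _ hs)
  set dfin := rods.foldl (fun dp rod => pvStepD rod dp)
    ((PySem.Dict.empty : PySem.Dict Int Int).insert 0 0) with hdfin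
  have hres : tallestBillboard1 rods = dfin.getD 0 (-1) := hloop.2.2.2 0 le_rfl hs
  have hdinv0 : pvDInv ((PySem.Dict.empty : PySem.Dict Int Int).insert 0 0) := by
    constructor
    · simp [PySem.Dict.keys_insert_of_not_contains, PySem.Dict.keys_empty]
    · intro p hp
      have : p ∈ (PySem.Dict.empty : PySem.Dict Int Int).items ∨ p = (0, 0) := by
        simpa [PySem.Dict.items_insert_of_not_contains] using hp
      rcases this with h | h
      · simp [PySem.Dict.empty] at h
      · simp [h]
  have hdinv : pvDInv dfin :=
    ⟨hloop.2.1, fun p hp => ⟨(hloop.2.2.1 p hp).1, (hloop.2.2.1 p hp).2.2⟩⟩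
  rw [hres, ← pvCD_nil_eq_getD dfin hdinv.1 (fun p hp => (hdinv.2 p hp).2), hdfin,
    pvCD_loop rods _ hpre hdinv0]
  have hitems : ((PySem.Dict.empty : PySem.Dict Int Int).insert 0 0).items = [(0, 0)] := by
    rw [PySem.Dict.items_insert_of_not_contains _ _ (by simp [PySem.Dict.contains_empty])]
    rfl
  rw [pvCD, hitems]
  simp only [List.map_cons, List.map_nil, List.foldl_cons, List.foldl_nil]
  obtain ⟨g, hg⟩ := pvG_zero_isSome rods
  have := pvG_nonneg rods hpre 0 le_rfl g hg
  rw [hg]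
  simp only [pvCo]
  omega

-- ---- B ↔ pvG: reachability sets and the backward level dicts ----

-- phase 1 run from an arbitrary starting set (pvPhase1 rods = pvP1run rods {0} by rfl)
def pvP1run (rods : List Int) (s0 : PySem.Set Int) : List (PySem.Set Int) × PySem.Set Int :=
  rods.foldl (fun st r => (st.1 ++ [st.2], pvPhase1Step r st.2)) ([], s0)

theorem pvMem_addpair_fold (r : Int) (l : List Int) : ∀ (s : PySem.Set Int) (y : Int),
    y ∈ l.foldl (fun c d => PySem.Set.add (PySem.Set.add c (d + r)) (|d - r|)) s
      ↔ y ∈ s ∨ ∃ d ∈ l, y = d + r ∨ y = |d - r| := by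
  induction l with
  | nil => intro s y; simp
  | cons d l ih =>
      intro s y
      rw [List.foldl_cons, ih]
      simp only [PySem.Set.mem_add, List.mem_cons]
      constructor
      · rintro (((h | h) | h) | ⟨d', hd', h⟩)
        · exact Or.inl h
        · exact Or.inr ⟨d, Or.inl rfl, Or.inl h⟩
        · exact Or.inr ⟨d, Or.inl rfl, Or.inr h⟩
        · exact Or.inr ⟨d', Or.inr hd', h⟩
      · rintro (h | ⟨d', hd' | hd', h⟩)
        · exact Or.inl (Or.inl (Or.inl h))
        · subst hd'; rcases h with h | h
          · exact Or.inl (Or.inl (Or.inr h))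
          · exact Or.inl (Or.inr h)
        · exact Or.inr ⟨d', hd', h⟩

theorem pvMem_phase1Step (r : Int) (prev : PySem.Set Int) (y : Int) :
    y ∈ pvPhase1Step r prev ↔ y ∈ prev ∨ ∃ d ∈ prev, y = d + r ∨ y = |d - r| := by
  rw [pvPhase1Step, pvMem_addpair_fold, PySem.Set.mem_ofList]

theorem pvNodup_addpair_fold (r : Int) (l : List Int) : ∀ (s : PySem.Set Int), s.Nodup →
    (l.foldl (fun c d => PySem.Set.add (PySem.Set.add c (d + r)) (|d - r|)) s).Nodup := by
  induction l with
  | nil => intro s h; exact h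
  | cons d l ih =>
      intro s h
      exact ih _ (PySem.Set.nodup_add _ _ (PySem.Set.nodup_add _ _ h))

theorem pvNodup_phase1Step (r : Int) (prev : PySem.Set Int) :
    (pvPhase1Step r prev).Nodup :=
  pvNodup_addpair_fold r prev _ (PySem.Set.nodup_ofList prev)

-- the backward level dict: built over distinct keys from empty, so a pure lookup table
theorem pvBuild_getD (l : PySem.Set Int) (hl : l.Nodup) (f : Int → Option Int) (x : Int) :
    (l.foldl (fun cur d => cur.insert d (f d)) (PySem.Dict.empty : PySem.Dict Int (Option Int))).getD x none
      = if x ∈ l then f x else none := by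
  have hfresh : ∀ a ∈ l, (PySem.Dict.empty : PySem.Dict Int (Option Int)).contains (id a) = false := by
    intro a _; simp [PySem.Dict.contains_empty]
  have hnd : (l.map (id : Int → Int)).Nodup := by simpa using hl
  have hitems := PySem.Dict.items_foldl_insert_fresh l (id : Int → Int) f PySem.Dict.empty hfresh hnd
  simp only [id] at hitems
  set D := l.foldl (fun cur d => cur.insert d (f d)) (PySem.Dict.empty : PySem.Dict Int (Option Int)) with hD
  have hitems' : D.items = l.map (fun a => (a, f a)) := by
    rw [hD, hitems]; simp [PySem.Dict.empty]
  have hkeys : D.keys = l := by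
    simp only [PySem.Dict.keys, hitems', List.map_map]
    exact List.map_id' l
  by_cases hx : x ∈ l
  · rw [if_pos hx]
    exact PySem.Dict.getD_of_mem_items D
      (by rw [hitems']; exact List.mem_map.mpr ⟨x, hx, rfl⟩) (by rw [hkeys]; exact hl) none
  · rw [if_neg hx]
    refine PySem.Dict.getD_of_not_contains D none ?_
    rw [PySem.Dict.contains_eq_decide_mem_keys, hkeys]
    simpa using hx

-- the candidate chain of B's inner loop is exactly the pvOmax combination
theorem pvCombine_eq (best : PySem.Dict Int (Option Int)) (r d : Int) :
    pvCombine best r d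
      = pvOmax (pvOmax (best.getD d none) (best.getD (d + r) none))
          ((best.getD (|d - r|) none).map (· + min d r)) := by
  unfold pvCombine
  rcases best.getD d none with _ | cv <;>
    rcases best.getD (d + r) none with _ | tv <;>
      rcases best.getD (|d - r|) none with _ | sv <;>
        simp only [pvOmax, Option.map_none, Option.map_some] <;>
          split_ifs <;> simp_all <;> (try (split_ifs <;> simp_all)) <;> omega

theorem pvP1_acc (rods : List Int) : ∀ (acc : List (PySem.Set Int)) (s : PySem.Set Int),
    (rods.foldl (fun st r => (st.1 ++ [st.2], pvPhase1Step r st.2)) (acc, s)).1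
      = acc ++ (pvP1run rods s).1 := by
  induction rods with
  | nil => intro acc s; simp [pvP1run]
  | cons r rest ih =>
      intro acc s
      simp only [pvP1run, List.foldl_cons, List.nil_append]
      rw [ih (acc ++ [s]) (pvPhase1Step r s), ih [s] (pvPhase1Step r s)]
      simp only [pvP1run]
      simp

theorem pvP1_len (rods : List Int) : ∀ (s : PySem.Set Int),
    (pvP1run rods s).1.length = rods.length := by
  induction rods with
  | nil => intro s; rfl
  | cons r rest ih =>
      intro s
      simp only [pvP1run, List.foldl_cons, List.nil_append]
      rw [pvP1_acc rest [s] (pvPhase1Step r s), List.length_append,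
        ih (pvPhase1Step r s)]
      simp
      omega

theorem pvB_main (rods : List Int) : ∀ (s0 : PySem.Set Int), s0.Nodup → ∀ x ∈ s0,
    (((rods.reverse.zip ((pvP1run rods s0).1.reverse)).foldl pvPhase2Step
        ((PySem.Dict.empty : PySem.Dict Int (Option Int)).insert 0 (some 0))).getD x none)
      = pvG rods x := by
  induction rods with
  | nil =>
      intro s0 _ x _
      simp [pvP1run, pvG_nil, PySem.Dict.getD_insert, PySem.Dict.getD_empty]
  | cons r rest ih =>
      intro s0 hs0 x hx
      have hdone : (pvP1run (r :: rest) s0).1 = s0 :: (pvP1run rest (pvPhase1Step r s0)).1 := by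
        rw [pvP1run, List.foldl_cons, pvP1_acc]
        simp
      have hlen : rest.reverse.length = (pvP1run rest (pvPhase1Step r s0)).1.reverse.length := by
        simp [pvP1_len]
      rw [hdone, List.reverse_cons, List.reverse_cons, List.zip_append hlen,
        List.foldl_append]
      simp only [List.zip_cons_cons, List.zip_nil_right, List.foldl_cons, List.foldl_nil]
      set inner := (rest.reverse.zip ((pvP1run rest (pvPhase1Step r s0)).1.reverse)).foldl
        pvPhase2Step ((PySem.Dict.empty : PySem.Dict Int (Option Int)).insert 0 (some 0)) with hinner
      have hstep : pvPhase2Step inner (r, s0)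
          = s0.foldl (fun cur d => cur.insert d (pvCombine inner r d)) PySem.Dict.empty := rfl
      rw [hstep, pvBuild_getD s0 hs0 _ x, if_pos hx, pvCombine_eq]
      have hnext := pvNodup_phase1Step r s0
      have hm1 : x ∈ pvPhase1Step r s0 := (pvMem_phase1Step r s0 x).mpr (Or.inl hx)
      have hm2 : x + r ∈ pvPhase1Step r s0 :=
        (pvMem_phase1Step r s0 _).mpr (Or.inr ⟨x, hx, Or.inl rfl⟩)
      have hm3 : |x - r| ∈ pvPhase1Step r s0 :=
        (pvMem_phase1Step r s0 _).mpr (Or.inr ⟨x, hx, Or.inr rfl⟩)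
      rw [ih (pvPhase1Step r s0) hnext x hm1, ih (pvPhase1Step r s0) hnext _ hm2,
        ih (pvPhase1Step r s0) hnext _ hm3, pvG_cons]

-- B's result equals the backward-recursion potential at difference 0
theorem pvB_eq_G (rods : List Int) (g : Int) (hg : pvG rods 0 = some g) :
    tallestBillboard1_alt rods = g := by
  have h0 : (0 : Int) ∈ PySem.Set.ofList [(0 : Int)] := by decide
  have hnd : (PySem.Set.ofList [(0 : Int)]).Nodup := PySem.Set.nodup_ofList _
  have hb := pvB_main rods (PySem.Set.ofList [0]) hnd 0 h0
  show (match (((rods.reverse.zip ((pvP1run rods (PySem.Set.ofList [0])).1.reverse)).foldl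
      pvPhase2Step ((PySem.Dict.empty : PySem.Dict Int (Option Int)).insert 0 (some 0))).getD 0 none) with
    | some v => v
    | none => 0) = g
  rw [hb, hg]

-- ===== VERDICT (by name: the statement is the Claim_ definition above) =====
theorem tallestBillboard1_spec : Claim_equal_tallestBillboard1 := by
  intro rods _ hpre
  unfold Spec_tallestBillboard1
  obtain ⟨g, hg⟩ := pvG_zero_isSome rods
  rw [pvA_eq_G rods hpre, pvB_eq_G rods g hg, hg]
  simp [pvCo]
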